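-- pv_equiv track=rewrite | github.com/Wu-GQ/PythonDemos | LeetCode/LeetCode_Array.py | minCount
-- ===== SOURCE A (Python) =====
-- def minCount(coins: list) -> int:
--     """
--     拿硬币
--     :param coins:
--     :return:
--     """
--     result = 0
--     for i in coins:
--         if i % 2 == 1:
--             result += i // 2 + 1
--         else:
--             result += i // 2
--     return result
-- ===== SOURCE B (Python) =====
-- def minCount(coins: list) -> int:
--     # Divide and conquer over index ranges: each leaf contributes ceil(c/2) via -(-c//2).
--     def go(lo, hi):
--         n = hi - lo
--         if n == 0:
--             return 0
--         if n == 1: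
--             return -(-coins[lo] // 2)
--         mid = (lo + hi) // 2
--         return go(lo, mid) + go(mid, hi)
--     return go(0, len(coins))
-- ===== Notes on version B (the rewrite author's own statement) =====
-- stated objective: alternative
-- what changed: B replaces A's left-to-right accumulator loop with a divide-and-conquer recursion over index ranges, each singleton range contributing ceil(c/2) computed as -(-c//2) instead of A's parity branch.
import Mathlib
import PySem

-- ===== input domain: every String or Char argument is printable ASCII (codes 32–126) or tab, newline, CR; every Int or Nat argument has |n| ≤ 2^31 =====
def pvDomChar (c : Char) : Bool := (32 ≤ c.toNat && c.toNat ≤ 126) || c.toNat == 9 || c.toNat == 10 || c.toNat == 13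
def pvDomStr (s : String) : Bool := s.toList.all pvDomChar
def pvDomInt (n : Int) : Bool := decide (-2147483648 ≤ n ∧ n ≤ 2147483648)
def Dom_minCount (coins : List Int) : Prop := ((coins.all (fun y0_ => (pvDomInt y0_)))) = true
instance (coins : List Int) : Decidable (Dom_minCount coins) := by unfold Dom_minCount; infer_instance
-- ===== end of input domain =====

-- B replaces A's accumulator loop by a divide-and-conquer recursion over index ranges,
-- each singleton contributing ceil(c/2) as -(-c//2) (alternative decomposition, same cost).

-- ===== PORT A =====
def minCount (coins : List Int) : Int :=
  coins.foldl
    (fun result i =>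
      if PySem.Int.mod i 2 = 1 then result + PySem.Int.floordiv i 2 + 1
      else result + PySem.Int.floordiv i 2)
    0

-- ===== PORT B =====
-- go(lo, hi) of Source B; lo is always in range when n = 1, so the .getD 0 default is never used.
def minCountGo (coins : List Int) (lo hi : Nat) : Int :=
  let n := hi - lo
  if n = 0 then 0
  else if n = 1 then
    -(PySem.Int.floordiv (-((PySem.List.pyGet? coins (Int.ofNat lo)).getD 0)) 2)
  else
    let mid := (lo + hi) / 2
    minCountGo coins lo mid + minCountGo coins mid hi
termination_by hi - lo
decreasing_by all_goals omega

def minCount_alt (coins : List Int) : Int :=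
  minCountGo coins 0 coins.length

-- ===== PRECONDITION & SPEC =====
def Spec_minCount (coins : List Int) (out : Int) : Prop := out = minCount_alt coins
instance (coins : List Int) (out : Int) : Decidable (Spec_minCount coins out) := by unfold Spec_minCount; infer_instance

-- ===== CLAIM (what is proved, stated in full; the proofs are below) =====
def Claim_equal_minCount : Prop := ∀ (coins : List Int), Dom_minCount coins → Spec_minCount coins (minCount coins)

-- ===== LEMMAS AND PROOFS =====

-- per-element contribution of A's loop (= ceil(i/2))
def pvH (i : Int) : Int := PySem.Int.floordiv i 2 + PySem.Int.mod i 2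

lemma pvMod (a : Int) : PySem.Int.mod a 2 = a % 2 :=
  PySem.Int.mod_eq_emod_of_pos (by norm_num)

lemma pvDiv (a : Int) : PySem.Int.floordiv a 2 = a / 2 :=
  PySem.Int.floordiv_eq_ediv_of_pos (by norm_num)

lemma pvA_fold (coins : List Int) (r : Int) :
    coins.foldl
      (fun result i =>
        if PySem.Int.mod i 2 = 1 then result + PySem.Int.floordiv i 2 + 1
        else result + PySem.Int.floordiv i 2)
      r = r + (coins.map pvH).sum := by
  induction coins generalizing r with
  | nil => simp
  | cons c cs ih =>
      rw [List.foldl_cons, ih]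
      simp only [List.map_cons, List.sum_cons, pvH, pvMod, pvDiv]
      split_ifs <;> omega

lemma pvCeil (c : Int) : -(PySem.Int.floordiv (-c) 2) = pvH c := by
  simp only [pvH, pvDiv, pvMod]; omega

lemma pvGo_eq (coins : List Int) :
    ∀ n lo hi, hi - lo = n → lo ≤ hi → hi ≤ coins.length →
      minCountGo coins lo hi = (((coins.drop lo).take (hi - lo)).map pvH).sum := by
  intro n
  induction n using Nat.strong_induction_on with
  | _ n ih =>
    intro lo hi hn hle hlen
    rw [minCountGo]
    by_cases h0 : hi - lo = 0
    · simp [h0]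
    · by_cases h1 : hi - lo = 1
      · have hlt : lo < coins.length := by omega
        rw [if_neg h0, if_pos h1, h1]
        have hg : PySem.List.pyGet? coins (Int.ofNat lo) = some coins[lo] := by
          rw [show (Int.ofNat lo) = ((lo : Nat) : Int) from rfl, PySem.List.pyGet?_natCast]
          exact List.getElem?_eq_getElem hlt
        have htake : (coins.drop lo).take 1 = [coins[lo]] := by
          exact List.take_one_drop_eq_of_lt_length hlt
        rw [hg, htake]
        simpa using pvCeil coins[lo]
      · simp only [if_neg h0, if_neg h1]
        have hm1 : (lo + hi) / 2 - lo < n := by omega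
        have hm2 : hi - (lo + hi) / 2 < n := by omega
        rw [ih _ hm1 lo ((lo + hi) / 2) rfl (by omega) (by omega),
            ih _ hm2 ((lo + hi) / 2) hi rfl (by omega) hlen]
        have hsplit : (coins.drop lo).take (hi - lo)
            = (coins.drop lo).take ((lo + hi) / 2 - lo)
              ++ (coins.drop ((lo + hi) / 2)).take (hi - (lo + hi) / 2) := by
          have h : hi - lo = ((lo + hi) / 2 - lo) + (hi - (lo + hi) / 2) := by omega
          have hdd : lo + ((lo + hi) / 2 - lo) = (lo + hi) / 2 := by omega
          have hdd' : (lo + hi) / 2 - lo + lo = (lo + hi) / 2 := by omega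
          rw [h, List.take_add, List.drop_drop]
          rw [show ∀ m, coins.drop m = coins.drop m from fun _ => rfl]
          first
          | rw [hdd]
          | rw [hdd']
        rw [hsplit, List.map_append, List.sum_append]

-- ===== VERDICT (by name: the statement is the Claim_ definition above) =====
theorem minCount_spec : Claim_equal_minCount := by
  intro coins _
  unfold Spec_minCount minCount minCount_alt
  rw [pvA_fold, pvGo_eq coins (coins.length - 0) 0 coins.length rfl (Nat.zero_le _) le_rfl]
  simp
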